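-- pv_equiv track=rewrite | github.com/luckyunlock/algorithmSolutions | python/graphs/ConnectedComponents.py | DFS
-- ===== SOURCE A (Python) =====
-- def DFS(nodes, edges, order):
--
--
--     colors = { node: 'W' for node in nodes}
--     dfs_stack = []
--     groups = []
--     while order:
--         start = order.pop()
--         if colors[start] == 'W':
--             visited_nodes = []
--             DFS_aux(start, edges, colors, dfs_stack, visited_nodes)
--             groups.append(visited_nodes)
--
--     return dfs_stack, groups
--
-- def DFS_aux(node, edges, colors, dfs_stack, visited_nodes):
--     if colors[node] == 'W':
--         colors[node] = 'G'
--         for out_nodes in edges[node]: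
--              DFS_aux(out_nodes, edges, colors, dfs_stack, visited_nodes)
--         dfs_stack.append(node)
--         visited_nodes.append(node)
--         colors[node] = 'B'
-- ===== SOURCE B (Python) =====
-- def DFS(nodes, edges, order):
--     # Iterative DFS using one stack of tagged ('enter'/'exit') entries instead of
--     # recursion; same post-order, same groups.  Like A, this empties `order` in place.
--     colors = dict.fromkeys(nodes, 'W')
--     dfs_stack = []
--     groups = []
--     while order:
--         start = order.pop()
--         if colors[start] == 'W':
--             visited_nodes = []
--             todo = [('enter', start)]
--             while todo:
--                 tag, node = todo.pop()
--                 if tag == 'enter':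
--                     if colors[node] == 'W':
--                         colors[node] = 'G'
--                         todo.append(('exit', node))
--                         for child in reversed(edges[node]):
--                             todo.append(('enter', child))
--                 else:
--                     dfs_stack.append(node)
--                     visited_nodes.append(node)
--                     colors[node] = 'B'
--             groups.append(visited_nodes)
--     return dfs_stack, groups
-- ===== Notes on version B (the rewrite author's own statement) =====
-- stated objective: idiomatic
-- what changed: The recursive DFS_aux is replaced by the classic iterative DFS with a single stack of tagged enter/exit entries (children pushed reversed), producing the same post-order dfs_stack and groups without recursion; colors is built with dict.fromkeys.
import Mathlib
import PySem

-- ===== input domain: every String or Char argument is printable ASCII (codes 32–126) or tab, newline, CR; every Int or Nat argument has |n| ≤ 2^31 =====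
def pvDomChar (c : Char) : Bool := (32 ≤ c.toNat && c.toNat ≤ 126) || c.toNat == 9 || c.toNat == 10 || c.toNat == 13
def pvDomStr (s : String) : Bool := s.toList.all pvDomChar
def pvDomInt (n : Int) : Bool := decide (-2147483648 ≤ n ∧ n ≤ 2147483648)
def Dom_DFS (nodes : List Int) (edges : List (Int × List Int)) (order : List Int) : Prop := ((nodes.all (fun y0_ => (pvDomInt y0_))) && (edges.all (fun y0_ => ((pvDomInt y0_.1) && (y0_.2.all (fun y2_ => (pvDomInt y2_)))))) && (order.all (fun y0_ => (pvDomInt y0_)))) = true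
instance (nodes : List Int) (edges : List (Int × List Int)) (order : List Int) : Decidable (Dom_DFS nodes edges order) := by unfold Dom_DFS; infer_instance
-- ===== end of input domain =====

-- B replaces the recursive DFS_aux by the classic iterative DFS over one stack of tagged
-- enter/exit entries (same post-order, no recursion); both A and B empty the `order` list
-- in place (only return values are compared here).

-- ===== PORT A =====
-- state: (colors, dfs_stack, visited_nodes)
-- DFS_aux, fuel-indexed (the fuel nodes.length+1 passed below always exceeds the recursion depth)
def auxA (ed : PySem.Dict Int (List Int)) :
    Nat → Int → PySem.Dict Int String × List Int × List Int →
    PySem.Dict Int String × List Int × List Int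
  | 0, _, st => st
  | f+1, node, st =>
    if st.1.getD node "" = "W" then
      let st1 := (ed.getD node []).foldl (fun s ch => auxA ed f ch s)
                   (st.1.insert node "G", st.2.1, st.2.2)
      (st1.1.insert node "B", st1.2.1 ++ [node], st1.2.2 ++ [node])
    else st

-- the `while order: start = order.pop()` loop, applied to order.reverse
def outerA (ed : PySem.Dict Int (List Int)) (f : Nat) :
    List Int → PySem.Dict Int String → List Int → List (List Int) → List Int × List (List Int)
  | [], _, ds, gs => (ds, gs)
  | s :: rest, colors, ds, gs =>
    if colors.getD s "" = "W" then
      let st := auxA ed f s (colors, ds, [])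
      outerA ed f rest st.1 st.2.1 (gs ++ [st.2.2])
    else outerA ed f rest colors ds gs

def DFS (nodes : List Int) (edges : List (Int × List Int)) (order : List Int) :
    List Int × List (List Int) :=
  let ed := PySem.Dict.ofList edges
  let colors := nodes.foldl (fun d n => d.insert n "W") PySem.Dict.empty
  outerA ed (nodes.length + 1) order.reverse colors [] []

-- ===== PORT B =====
-- the inner `while todo` loop; entries are (tag, node) with tag = true for 'enter',
-- false for 'exit'; head of the list = top of the stack.  Python pushes
-- reversed(edges[node]) onto a pop-from-end stack, so with head-as-top the pushed
-- block is the adjacency list in order; fuel always exceeds the number of pops.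
def runB (ed : PySem.Dict Int (List Int)) :
    Nat → List (Bool × Int) → PySem.Dict Int String × List Int × List Int →
    PySem.Dict Int String × List Int × List Int
  | 0, _, st => st
  | _+1, [], st => st
  | f+1, (tag, node) :: rest, st =>
    if tag then
      if st.1.getD node "" = "W" then
        runB ed f ((ed.getD node []).map (fun c => (true, c)) ++ (false, node) :: rest)
          (st.1.insert node "G", st.2.1, st.2.2)
      else runB ed f rest st
    else runB ed f rest (st.1.insert node "B", st.2.1 ++ [node], st.2.2 ++ [node])

def DFS_alt (nodes : List Int) (edges : List (Int × List Int)) (order : List Int) :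
    List Int × List (List Int) :=
  let ed := PySem.Dict.ofList edges
  let fb := 1 + (1 + (edges.map (fun p => p.2.length)).sum) * nodes.length
  let acc := order.reverse.foldl
    (fun acc s =>
      if acc.1.getD s "" = "W" then
        let st := runB ed fb [(true, s)] (acc.1, acc.2.1, [])
        (st.1, st.2.1, acc.2.2 ++ [st.2.2])
      else acc)
    (PySem.Dict.ofList (nodes.map (fun n => (n, "W"))), ([] : List Int), ([] : List (List Int)))
  (acc.2.1, acc.2.2)

-- ===== PRECONDITION & SPEC =====
-- plain breadth-first reachability closure over the edges dict (independent of either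
-- port's traversal): one expansion level per iteration, edges.length levels suffice
def stepR (ed : PySem.Dict Int (List Int)) (S : List Int) : List Int :=
  S.foldl (fun acc n => (ed.getD n []).foldl
    (fun a c => if a.contains c then a else a ++ [c]) acc) S

def reachN (ed : PySem.Dict Int (List Int)) : Nat → List Int → List Int
  | 0, S => S
  | f+1, S => reachN ed f (stepR ed S)

-- Pre_ excludes exactly the inputs on which the Python raises KeyError: some popped start
-- is missing from colors (= nodes), or some node reachable from the starts — and every
-- reachable node really is visited by the run — lacks an edges entry or has a child
-- outside nodes.
def Pre_DFS (nodes : List Int) (edges : List (Int × List Int)) (order : List Int) : Prop :=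
  (∀ s ∈ order, s ∈ nodes) ∧
  ∀ n ∈ reachN (PySem.Dict.ofList edges) edges.length order,
    (PySem.Dict.ofList edges).contains n = true ∧
    ∀ c ∈ (PySem.Dict.ofList edges).getD n [], c ∈ nodes
instance (nodes : List Int) (edges : List (Int × List Int)) (order : List Int) : Decidable (Pre_DFS nodes edges order) := by unfold Pre_DFS; infer_instance

def pvWitness_DFS : List Int × (List (Int × List Int)) × List Int :=
  ([0, 1, 2], [(0, [1]), (1, []), (2, [0])], [0, 2])

def Spec_DFS (nodes : List Int) (edges : List (Int × List Int)) (order : List Int) (out : List Int × List (List Int)) : Prop := out = DFS_alt nodes edges order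
instance (nodes : List Int) (edges : List (Int × List Int)) (order : List Int) (out : List Int × List (List Int)) : Decidable (Spec_DFS nodes edges order out) := by unfold Spec_DFS; infer_instance

-- ===== CLAIM (what is proved, stated in full; the proofs are below) =====
def Claim_equal_DFS : Prop := ∀ (nodes : List Int) (edges : List (Int × List Int)) (order : List Int), Dom_DFS nodes edges order → Pre_DFS nodes edges order → Spec_DFS nodes edges order (DFS nodes edges order)

-- ===== LEMMAS AND PROOFS =====

-- number of 'W'-colored entries; the common termination/fuel measure
def wcs (d : PySem.Dict Int String) : Nat := d.items.countP (fun p => p.2 == "W")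

-- the common "finish node n" step
def finB (n : Int) (st : PySem.Dict Int String × List Int × List Int) :
    PySem.Dict Int String × List Int × List Int :=
  (st.1.insert n "B", st.2.1 ++ [n], st.2.2 ++ [n])

-- A's DFS_aux with just enough fuel
def auxRun (ed : PySem.Dict Int (List Int)) (n : Int)
    (st : PySem.Dict Int String × List Int × List Int) :
    PySem.Dict Int String × List Int × List Int :=
  auxA ed (wcs st.1 + 1) n st

def foldRun (ed : PySem.Dict Int (List Int)) (l : List Int)
    (st : PySem.Dict Int String × List Int × List Int) :
    PySem.Dict Int String × List Int × List Int :=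
  l.foldl (fun s ch => auxRun ed ch s) st

-- B's loop measure
def bndB (E : Nat) (stack : List (Bool × Int)) (c : PySem.Dict Int String) : Nat :=
  stack.length + (1 + E) * wcs c

lemma auxA_step (ed : PySem.Dict Int (List Int)) (f : Nat) (n : Int) st :
    auxA ed (f+1) n st =
      if st.1.getD n "" = "W" then
        finB n ((ed.getD n []).foldl (fun s ch => auxA ed f ch s)
          (st.1.insert n "G", st.2.1, st.2.2))
      else st := rfl

lemma runB_step (ed : PySem.Dict Int (List Int)) (f : Nat) (tag : Bool) (n : Int)
    (rest : List (Bool × Int)) st :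
    runB ed (f+1) ((tag, n) :: rest) st =
      if tag then
        if st.1.getD n "" = "W" then
          runB ed f ((ed.getD n []).map (fun c => (true, c)) ++ (false, n) :: rest)
            (st.1.insert n "G", st.2.1, st.2.2)
        else runB ed f rest st
      else runB ed f rest (finB n st) := rfl

lemma outerA_cons (ed : PySem.Dict Int (List Int)) (f : Nat) (s : Int) (rest : List Int)
    (colors : PySem.Dict Int String) (ds : List Int) (gs : List (List Int)) :
    outerA ed f (s :: rest) colors ds gs =
      if colors.getD s "" = "W" then
        outerA ed f rest (auxA ed f s (colors, ds, [])).1 (auxA ed f s (colors, ds, [])).2.1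
          (gs ++ [(auxA ed f s (colors, ds, [])).2.2])
      else outerA ed f rest colors ds gs := rfl

lemma countP_map_repl_le (k : Int) (v : String) (hv : (v == "W") = false) :
    ∀ l : List (Int × String),
      (l.map (fun p => if (p.1 == k) = true then (k, v) else p)).countP (fun p => p.2 == "W")
        ≤ l.countP (fun p => p.2 == "W") := by
  intro l; induction l with
  | nil => simp
  | cons p t ih =>
    simp only [List.map_cons, List.countP_cons]
    split_ifs <;> simp_all <;> omega

lemma wcs_insert_le (d : PySem.Dict Int String) (k : Int) (v : String)
    (hv : (v == "W") = false) : wcs (d.insert k v) ≤ wcs d := by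
  unfold wcs
  by_cases hc : d.contains k = true
  · rw [PySem.Dict.items_insert_of_contains d v hc]
    exact countP_map_repl_le k v hv d.items
  · rw [PySem.Dict.items_insert_of_not_contains d v (by simpa using hc)]
    simp [List.countP_append, hv]

lemma getD_W_get? (d : PySem.Dict Int String) (k : Int) (h : d.getD k "" = "W") :
    d.get? k = some "W" := by
  rw [PySem.Dict.getD_eq_get?_getD] at h
  cases hk : d.get? k with
  | none => rw [hk] at h; simp at h
  | some v => rw [hk] at h; simp at h; rw [h]

lemma countP_map_repl_lt (k : Int) :
    ∀ l : List (Int × String),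
      (l.find? (fun p => p.1 == k)).map Prod.snd = some "W" →
      (l.map (fun p => if (p.1 == k) = true then (k, "G") else p)).countP (fun p => p.2 == "W")
        < l.countP (fun p => p.2 == "W") := by
  intro l; induction l with
  | nil => simp
  | cons p t ih =>
    intro h
    simp only [List.map_cons, List.countP_cons]
    by_cases hp : (p.1 == k) = true
    · simp only [List.find?_cons, hp, if_true, Option.map_some] at h
      have h2 : (p.2 == "W") = true := by simpa using h
      have := countP_map_repl_le k "G" (by decide) t
      split_ifs <;> simp_all <;> omega
    · simp only [List.find?_cons, hp, if_false] at h
      have := ih h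
      split_ifs <;> simp_all <;> omega

lemma wcs_insert_G_lt (d : PySem.Dict Int String) (k : Int) (h : d.getD k "" = "W") :
    wcs (d.insert k "G") < wcs d := by
  have hg := getD_W_get? d k h
  have hc : d.contains k = true := by
    rw [PySem.Dict.contains_eq_isSome_get?, hg]; rfl
  unfold wcs
  rw [PySem.Dict.items_insert_of_contains d "G" hc]
  exact countP_map_repl_lt k d.items (by simpa [PySem.Dict.get?] using hg)

lemma wcs_pos_of_W (d : PySem.Dict Int String) (k : Int) (h : d.getD k "" = "W") :
    1 ≤ wcs d := by
  have hg := getD_W_get? d k h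
  have hmem := PySem.Dict.mem_items_of_get?_eq_some _ hg
  exact List.countP_pos_iff.mpr ⟨(k, "W"), hmem, by simp⟩

lemma wcs_auxA_le (ed : PySem.Dict Int (List Int)) :
    ∀ f (n : Int) st, wcs (auxA ed f n st).1 ≤ wcs st.1 := by
  intro f
  induction f with
  | zero => intro n st; exact le_refl _
  | succ f ih =>
    intro n st
    have hfold : ∀ (l : List Int) st',
        wcs ((l.foldl (fun s ch => auxA ed f ch s) st').1) ≤ wcs st'.1 := by
      intro l
      induction l with
      | nil => intro st'; exact le_refl _
      | cons c t iht =>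
        intro st'
        simpa using le_trans (iht _) (ih c st')
    simp only [auxA]
    by_cases h : st.1.getD n "" = "W"
    · rw [if_pos h]
      exact le_trans (wcs_insert_le _ _ _ (by decide))
        (le_trans (hfold _ _) (le_of_lt (wcs_insert_G_lt _ _ h)))
    · rw [if_neg h]

lemma auxA_stable (ed : PySem.Dict Int (List Int)) :
    ∀ f (n : Int) st, wcs st.1 + 1 ≤ f → auxA ed (f+1) n st = auxA ed f n st := by
  intro f
  induction f with
  | zero => intro n st h; exact absurd h (by omega)
  | succ f ih =>
    intro n st h
    show auxA ed (f+2) n st = auxA ed (f+1) n st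
    conv_lhs => rw [auxA]
    conv_rhs => rw [auxA]
    by_cases hW : st.1.getD n "" = "W"
    · rw [if_pos hW, if_pos hW]
      have hfold : ∀ (l : List Int) st', wcs st'.1 + 1 ≤ f →
          l.foldl (fun s ch => auxA ed (f+1) ch s) st'
            = l.foldl (fun s ch => auxA ed f ch s) st' := by
        intro l
        induction l with
        | nil => intro st' _; rfl
        | cons c t iht =>
          intro st' hst'
          simp only [List.foldl_cons]
          rw [ih c st' hst']
          exact iht _ (by have := wcs_auxA_le ed f c st'; omega)
      have hw1 : wcs (st.1.insert n "G") + 1 ≤ f := by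
        have := wcs_insert_G_lt st.1 n hW; omega
      rw [hfold _ _ hw1]
    · rw [if_neg hW, if_neg hW]

lemma auxA_ge (ed : PySem.Dict Int (List Int)) (f : Nat) (n : Int) st
    (h : wcs st.1 + 1 ≤ f) : auxA ed f n st = auxRun ed n st := by
  induction f, h using Nat.le_induction with
  | base => rfl
  | succ f hf ih => rw [auxA_stable ed f n st hf]; exact ih

lemma auxRun_not_white (ed : PySem.Dict Int (List Int)) (n : Int) st
    (h : ¬ st.1.getD n "" = "W") : auxRun ed n st = st := by
  unfold auxRun; rw [auxA_step, if_neg h]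

lemma auxA_W_unfold (ed : PySem.Dict Int (List Int)) (f : Nat) (n : Int) st
    (h : st.1.getD n "" = "W") (hf : wcs st.1 + 1 ≤ f) :
    auxA ed f n st = finB n (foldRun ed (ed.getD n []) (st.1.insert n "G", st.2.1, st.2.2)) := by
  have h1 := wcs_insert_G_lt st.1 n h
  have hfold : ∀ (l : List Int) st' (g : Nat), wcs st'.1 + 1 ≤ g →
      l.foldl (fun s ch => auxA ed g ch s) st' = foldRun ed l st' := by
    intro l
    induction l with
    | nil => intro st' g _; rfl
    | cons c t iht =>
      intro st' g hg
      simp only [List.foldl_cons, foldRun] at *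
      rw [auxA_ge ed g c st' hg]
      exact iht (auxRun ed c st') g
        (by have := wcs_auxA_le ed (wcs st'.1 + 1) c st'; unfold auxRun at *; omega)
  rw [auxA_ge ed f n st hf]
  show auxA ed (wcs st.1 + 1) n st = _
  simp only [auxA]
  rw [if_pos h]
  rw [hfold (ed.getD n []) (st.1.insert n "G", st.2.1, st.2.2) (wcs st.1)
    (by show wcs (st.1.insert n "G") + 1 ≤ wcs st.1; omega)]
  rfl

lemma wcs_foldRun_le (ed : PySem.Dict Int (List Int)) :
    ∀ (l : List Int) st, wcs (foldRun ed l st).1 ≤ wcs st.1 := by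
  intro l
  induction l with
  | nil => intro st; exact le_refl _
  | cons c t iht =>
    intro st
    have h1 : wcs (auxRun ed c st).1 ≤ wcs st.1 := wcs_auxA_le ed _ c st
    have h2 := iht (auxRun ed c st)
    simp only [foldRun, List.foldl_cons] at *
    omega

lemma runB_nil (ed : PySem.Dict Int (List Int)) : ∀ f st, runB ed f [] st = st := by
  intro f st; cases f <;> rfl

lemma runB_stable (ed : PySem.Dict Int (List Int)) (E : Nat)
    (hE : ∀ m : Int, (ed.getD m ([] : List Int)).length ≤ E) :
    ∀ f stack st, bndB E stack st.1 ≤ f → runB ed (f+1) stack st = runB ed f stack st := by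
  intro f
  induction f with
  | zero =>
    intro stack st hb
    cases stack with
    | nil => rw [runB_nil, runB_nil]
    | cons p rest => exfalso; simp [bndB] at hb
  | succ f ih =>
    intro stack st hb
    cases stack with
    | nil => rw [runB_nil, runB_nil]
    | cons pr rest =>
      obtain ⟨tag, n⟩ := pr
      have hbb := hb
      simp only [bndB, List.length_cons] at hbb
      rw [runB_step, runB_step]
      cases tag with
      | false =>
        simp only [if_false, Bool.false_eq_true]
        apply ih
        have hw : wcs (st.1.insert n "B") ≤ wcs st.1 := wcs_insert_le st.1 n "B" (by decide)
        have hm := Nat.mul_le_mul_left (1 + E) hw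
        simp only [bndB, finB]
        omega
      | true =>
        simp only [if_true]
        by_cases hW : st.1.getD n "" = "W"
        · rw [if_pos hW, if_pos hW]
          apply ih
          have hw : wcs (st.1.insert n "G") + 1 ≤ wcs st.1 := wcs_insert_G_lt st.1 n hW
          have hm : (1 + E) * (wcs (st.1.insert n "G") + 1) ≤ (1 + E) * wcs st.1 :=
            Nat.mul_le_mul_left (1 + E) hw
          rw [Nat.mul_add, Nat.mul_one] at hm
          have hch := hE n
          simp only [bndB, List.length_append, List.length_map, List.length_cons]
          omega
        · rw [if_neg hW, if_neg hW]
          apply ih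
          simp only [bndB]
          omega

lemma runB_fuel (ed : PySem.Dict Int (List Int)) (E : Nat)
    (hE : ∀ m : Int, (ed.getD m ([] : List Int)).length ≤ E)
    (stack : List (Bool × Int)) st :
    ∀ f g, bndB E stack st.1 ≤ f → bndB E stack st.1 ≤ g →
      runB ed f stack st = runB ed g stack st := by
  have key : ∀ f, bndB E stack st.1 ≤ f →
      runB ed f stack st = runB ed (bndB E stack st.1) stack st := by
    intro f hf
    induction f, hf using Nat.le_induction with
    | base => rfl
    | succ f hf ihx => rw [runB_stable ed E hE f stack st hf]; exact ihx
  intro f g hf hg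
  rw [key f hf, key g hg]

-- the bridge: a block of 'enter' entries on top of the stack behaves like A's
-- recursive fold over the same nodes
lemma runB_enters (ed : PySem.Dict Int (List Int)) (E : Nat)
    (hE : ∀ m : Int, (ed.getD m ([] : List Int)).length ≤ E) :
    ∀ f (l : List Int) (rest : List (Bool × Int)) st,
      l.length + rest.length + (1 + E) * wcs st.1 ≤ f →
      runB ed f (l.map (fun c => (true, c)) ++ rest) st = runB ed f rest (foldRun ed l st) := by
  intro f
  induction f using Nat.strong_induction_on with
  | _ f ih =>
  intro l rest st hb
  cases l with
  | nil => simp [foldRun]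
  | cons c t =>
    have hf1 : 1 ≤ f := by simp only [List.length_cons] at hb; omega
    obtain ⟨g, rfl⟩ : ∃ g, f = g + 1 := ⟨f - 1, by omega⟩
    simp only [List.map_cons, List.cons_append]
    rw [runB_step]
    simp only [if_true]
    simp only [List.length_cons] at hb
    by_cases hW : st.1.getD c "" = "W"
    · rw [if_pos hW]
      have hwpos : 1 ≤ wcs st.1 := wcs_pos_of_W st.1 c hW
      have hwG : wcs (st.1.insert c "G") + 1 ≤ wcs st.1 := wcs_insert_G_lt st.1 c hW
      have hmG : (1 + E) * (wcs (st.1.insert c "G") + 1) ≤ (1 + E) * wcs st.1 :=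
        Nat.mul_le_mul_left (1 + E) hwG
      rw [Nat.mul_add, Nat.mul_one] at hmG
      have hch := hE c
      have hg1 : 1 ≤ g := by omega
      obtain ⟨h, rfl⟩ : ∃ h, g = h + 1 := ⟨g - 1, by omega⟩
      refine Eq.trans (ih (h + 1) (by omega) (ed.getD c [])
        ((false, c) :: (t.map (fun x => (true, x)) ++ rest))
        (st.1.insert c "G", st.2.1, st.2.2)
        (by simp only [List.length_cons, List.length_append, List.length_map]; omega)) ?_
      rw [runB_step]
      simp only [if_false, Bool.false_eq_true]
      have hfin : finB c (foldRun ed (ed.getD c [])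
          (st.1.insert c "G", st.2.1, st.2.2)) = auxRun ed c st :=
        (auxA_W_unfold ed (wcs st.1 + 1) c st hW (le_refl _)).symm
      rw [hfin]
      have hwA : wcs (auxRun ed c st).1 + 1 ≤ wcs st.1 := by
        have h1 : wcs (auxRun ed c st).1
            ≤ wcs (foldRun ed (ed.getD c []) (st.1.insert c "G", st.2.1, st.2.2)).1 := by
          rw [← hfin]
          exact wcs_insert_le _ _ _ (by decide)
        have h2 : wcs (foldRun ed (ed.getD c [])
            (st.1.insert c "G", st.2.1, st.2.2)).1 ≤ wcs (st.1.insert c "G") :=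
          wcs_foldRun_le ed (ed.getD c []) (st.1.insert c "G", st.2.1, st.2.2)
        omega
      have hmA : (1 + E) * (wcs (auxRun ed c st).1 + 1) ≤ (1 + E) * wcs st.1 :=
        Nat.mul_le_mul_left (1 + E) hwA
      rw [Nat.mul_add, Nat.mul_one] at hmA
      refine Eq.trans (ih h (by omega) t rest (auxRun ed c st) (by omega)) ?_
      have hwF : wcs (foldRun ed (c :: t) st).1 ≤ wcs (auxRun ed c st).1 :=
        wcs_foldRun_le ed t (auxRun ed c st)
      have hmF : (1 + E) * wcs (foldRun ed (c :: t) st).1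
          ≤ (1 + E) * wcs (auxRun ed c st).1 := Nat.mul_le_mul_left (1 + E) hwF
      exact runB_fuel ed E hE rest (foldRun ed (c :: t) st) h (h + 1 + 1)
        (by simp only [bndB]; omega)
        (by simp only [bndB]; omega)
    · rw [if_neg hW]
      refine Eq.trans (ih g (by omega) t rest st (by omega)) ?_
      have hfold : foldRun ed (c :: t) st = foldRun ed t st := by
        show foldRun ed t (auxRun ed c st) = foldRun ed t st
        rw [auxRun_not_white ed c st hW]
      rw [hfold]
      have hwF : wcs (foldRun ed t st).1 ≤ wcs st.1 := wcs_foldRun_le ed t st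
      have hmF : (1 + E) * wcs (foldRun ed t st).1 ≤ (1 + E) * wcs st.1 :=
        Nat.mul_le_mul_left (1 + E) hwF
      exact runB_fuel ed E hE rest (foldRun ed t st) g (g + 1)
        (by simp only [bndB]; omega)
        (by simp only [bndB]; omega)

lemma runB_one (ed : PySem.Dict Int (List Int)) (E : Nat)
    (hE : ∀ m : Int, (ed.getD m ([] : List Int)).length ≤ E)
    (f : Nat) (s : Int) st (hf : 1 + (1 + E) * wcs st.1 ≤ f) :
    runB ed f [(true, s)] st = auxRun ed s st := by
  have h := runB_enters ed E hE f [s] [] st (by simpa using hf)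
  simpa [runB_nil, foldRun] using h

lemma outer_eq (ed : PySem.Dict Int (List Int)) (E N : Nat)
    (hE : ∀ m : Int, (ed.getD m ([] : List Int)).length ≤ E) :
    ∀ (rev : List Int) (colors : PySem.Dict Int String) (ds : List Int) (gs : List (List Int)),
      wcs colors ≤ N →
      ((rev.foldl (fun acc s =>
          if acc.1.getD s "" = "W" then
            let st := runB ed (1 + (1 + E) * N) [(true, s)] (acc.1, acc.2.1, [])
            (st.1, st.2.1, acc.2.2 ++ [st.2.2])
          else acc) (colors, ds, gs)).2.1,
       (rev.foldl (fun acc s =>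
          if acc.1.getD s "" = "W" then
            let st := runB ed (1 + (1 + E) * N) [(true, s)] (acc.1, acc.2.1, [])
            (st.1, st.2.1, acc.2.2 ++ [st.2.2])
          else acc) (colors, ds, gs)).2.2)
        = outerA ed (N + 1) rev colors ds gs := by
  intro rev
  induction rev with
  | nil => intro colors ds gs _; rfl
  | cons s t ih =>
    intro colors ds gs hwc
    rw [outerA_cons]
    simp only [List.foldl_cons]
    by_cases hW : colors.getD s "" = "W"
    · rw [if_pos hW]
      simp only [hW, if_pos]
      have hone : runB ed (1 + (1 + E) * N) [(true, s)] (colors, ds, [])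
          = auxRun ed s (colors, ds, []) :=
        runB_one ed E hE _ s (colors, ds, [])
          (show 1 + (1 + E) * wcs colors ≤ 1 + (1 + E) * N by
            have := Nat.mul_le_mul_left (1 + E) hwc; omega)
      have hA : auxA ed (N + 1) s (colors, ds, ([] : List Int))
          = auxRun ed s (colors, ds, []) :=
        auxA_ge ed (N + 1) s (colors, ds, []) (by simpa using Nat.succ_le_succ hwc)
      rw [hone, hA]
      exact ih _ _ _ (le_trans (wcs_auxA_le ed _ s (colors, ds, [])) hwc)
    · rw [if_neg hW]
      simp only [hW, if_neg, if_false]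
      exact ih colors ds gs hwc

lemma mem_items_foldl_insert (l : List (Int × List Int)) :
    ∀ (d : PySem.Dict Int (List Int)) (p : Int × List Int),
      p ∈ (l.foldl (fun d q => d.insert q.1 q.2) d).items → p ∈ d.items ∨ p ∈ l := by
  induction l with
  | nil => intro d p h; exact Or.inl h
  | cons q t ih =>
    intro d p h
    simp only [List.foldl_cons] at h
    rcases ih _ p h with h1 | h1
    · rcases (PySem.Dict.mem_items_insert d q.1 q.2 p).1 h1 with h2 | h2
      · right; simp [h2]
      · left; exact h2.1
    · right; right; exact h1

lemma getD_ofList_len_le (edges : List (Int × List Int)) (m : Int) :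
    ((PySem.Dict.ofList edges).getD m ([] : List Int)).length
      ≤ (edges.map (fun p => p.2.length)).sum := by
  rw [PySem.Dict.getD_eq_get?_getD]
  cases hk : (PySem.Dict.ofList edges).get? m with
  | none => simp
  | some v =>
    simp only [Option.getD_some]
    have hmem := PySem.Dict.mem_items_of_get?_eq_some _ hk
    have h2 := mem_items_foldl_insert edges PySem.Dict.empty (m, v)
      (by simpa [PySem.Dict.ofList, PySem.Dict.update] using hmem)
    rcases h2 with h | h
    · simp [PySem.Dict.empty] at h
    · exact List.le_sum_of_mem (List.mem_map.2 ⟨(m, v), h, rfl⟩)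

lemma wcs_init_le (nodes : List Int) :
    wcs (nodes.foldl (fun d n => d.insert n "W") PySem.Dict.empty) ≤ nodes.length := by
  have hlen : ∀ (l : List Int) (d : PySem.Dict Int String),
      (l.foldl (fun d n => d.insert n "W") d).items.length ≤ d.items.length + l.length := by
    intro l
    induction l with
    | nil => intro d; simp
    | cons a t ih =>
      intro d
      simp only [List.foldl_cons, List.length_cons]
      refine le_trans (ih _) ?_
      have := PySem.Dict.size_insert d a "W"
      simp only [PySem.Dict.size] at this
      split_ifs at this <;> omega
  exact le_trans List.countP_le_length
    (by simpa [PySem.Dict.empty] using hlen nodes PySem.Dict.empty)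

lemma colors_init (nodes : List Int) :
    PySem.Dict.ofList (nodes.map (fun n => (n, "W")))
      = nodes.foldl (fun d n => d.insert n "W") PySem.Dict.empty := by
  simp [PySem.Dict.ofList, PySem.Dict.update, List.foldl_map]

-- ===== VERDICT (by name: the statement is the Claim_ definition above) =====
theorem DFS_spec : Claim_equal_DFS := by
  intro nodes edges order _ _
  unfold Spec_DFS DFS DFS_alt
  rw [colors_init]
  exact (outer_eq (PySem.Dict.ofList edges) ((edges.map (fun p => p.2.length)).sum)
    nodes.length (getD_ofList_len_le edges) order.reverse _ [] [] (wcs_init_le nodes)).symm
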